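-- pv_equiv track=rewrite | github.com/ohjiae/SolvProbStudy_py | jhyun/[PRG]양과늑대.py | solution
-- ===== SOURCE A (Python) =====
-- from collections import deque
--
-- def bfs(start: int, visit, graph, info) -> int:
--     #이전 노드의 방문상태, 현재 노드, 양, 늑대
--     q = deque([(0b1, 0, 1, 0)])
--     visit[0][0b1] = True
--     result = 0
--     while q:
--         cur_stat, cur, cur_sheep, cur_wolf = q.popleft()
--         result = max(result, cur_sheep)
--         for nxt in graph[cur]:
--             nxt_stat = cur_stat | (1 << nxt)
--             nxt_sheep = cur_sheep if cur_stat & (1 << nxt) else cur_sheep + (info[nxt] + 1) % 2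
--             nxt_wolf = cur_wolf if cur_stat & (1 << nxt) else cur_wolf + info[nxt]
--             if nxt_wolf >= nxt_sheep: continue
--             if not visit[nxt][nxt_stat]:
--                 visit[nxt][nxt_stat] = True
--                 q.append((nxt_stat, nxt, nxt_sheep, nxt_wolf))
--     return result
--
-- def solution(info, edges):
--     visit = [[False] * (1 << len(info)) for _ in range(len(info))]
--     graph = [[] for _ in range(len(info))]
--     for edge in edges:
--         st, en = edge
--         graph[st].append(en)
--         graph[en].append(st)
--     answer = bfs(0, visit, graph, info)
--     return answer
-- ===== SOURCE B (Python) =====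
-- def solution(info, edges):
--     n = len(info)
--     adj = {}
--     for a, b in edges:
--         adj.setdefault(a, []).append(b)
--         adj.setdefault(b, []).append(a)
--     # bottom-up DP over all bitmasks in increasing numeric order: reach[m] says the
--     # connected collected set m (always containing node 0) is attainable with
--     # wolves < sheep at every step; extensions always have a larger mask.
--     full = 1 << n
--     reach = [False] * full
--     reach[1] = True
--     best = 0
--     for m in range(1, full):
--         if not reach[m]:
--             continue
--         sheep, wolf = 1, 0
--         for j in range(1, n):
--             if m >> j & 1:
--                 sheep += (info[j] + 1) % 2
--                 wolf += info[j]
--         if best < sheep: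
--             best = sheep
--         for v in range(n):
--             if m >> v & 1:
--                 for c in adj.get(v, []):
--                     if not m >> c & 1:
--                         w2 = wolf + info[c]
--                         s2 = sheep + (info[c] + 1) % 2
--                         if w2 < s2:
--                             reach[m | 1 << c] = True
--     return best
-- ===== Notes on version B (the rewrite author's own statement) =====
-- stated objective: alternative
-- what changed: Replaces the BFS over (position, mask) states with an n x 2^n boolean visit table by a bottom-up dynamic program that sweeps all bitmasks in increasing numeric order with a single 2^n reachability array (position forgotten): a mask is reachable if some reachable smaller mask extends to it by one adjacent node keeping wolves < sheep, and the answer is the max sheep count over reachable masks; adjacency is a dict instead of preallocated lists.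
-- outside the precondition, e.g. on solution([0, 0], [[1, -1]]): A returns 1, B returns 1; on solution([0, 0, 0], [[1, -2]]): A returns 1, B returns 1
import Mathlib
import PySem

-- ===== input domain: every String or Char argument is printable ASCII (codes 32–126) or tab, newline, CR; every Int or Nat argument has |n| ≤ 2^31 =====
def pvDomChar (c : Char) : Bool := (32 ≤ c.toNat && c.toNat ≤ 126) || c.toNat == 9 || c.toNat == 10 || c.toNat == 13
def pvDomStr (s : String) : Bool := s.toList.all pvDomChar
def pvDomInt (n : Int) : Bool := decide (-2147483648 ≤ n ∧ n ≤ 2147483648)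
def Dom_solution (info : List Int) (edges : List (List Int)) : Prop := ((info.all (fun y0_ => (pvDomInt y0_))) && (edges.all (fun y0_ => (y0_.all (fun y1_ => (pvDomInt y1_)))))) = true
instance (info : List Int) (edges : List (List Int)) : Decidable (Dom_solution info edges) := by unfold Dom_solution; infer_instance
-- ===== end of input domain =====

-- B replaces A's BFS over (position, bitmask) states with an n×2^n visit table by a
-- bottom-up dynamic program: one boolean reachability array over all 2^n collected-set
-- bitmasks, swept once in increasing numeric order (extensions always have a larger mask),
-- taking the max sheep count over reachable masks; adjacency is a dict.  Equivalence is
-- proved on Pre_solution (nonempty info, edges are pairs of node ids in range).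

-- ===== PORT A =====
-- (cur, stat) key universe used only as a termination measure for the worklist loop.
def pvUnivA (n : Nat) : Finset (Nat × Nat) := Finset.range n ×ˢ Finset.range (2 ^ n)

-- graph[st].append(en); graph[en].append(st).  Out-of-range/negative indices make Python
-- raise or wrap (outside Pre_solution); the port skips such edges there.
def pvBuildGraph (n : Nat) (edges : List (List Int)) : List (List Int) :=
  edges.foldl (fun g e =>
    match e with
    | [st, en] =>
        let g1 := if 0 ≤ st ∧ st < (n : Int) then g.set st.toNat (g.getD st.toNat [] ++ [en]) else g
        if 0 ≤ en ∧ en < (n : Int) then g1.set en.toNat (g1.getD en.toNat [] ++ [st]) else g1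
    | _ => g) (List.replicate n [])

-- one iteration of `for nxt in graph[cur]`: acc = (pending queue appends, visit set).
-- the bounds guards are exactly where Python would raise (1 << negative, info[nxt]/visit OOR).
def pvStepA (n : Nat) (info : List Int) (stat : Nat) (sheep wolf : Int)
    (acc : List (Nat × Nat × Int × Int) × Finset (Nat × Nat)) (nxt : Int) :
    List (Nat × Nat × Int × Int) × Finset (Nat × Nat) :=
  if 0 ≤ nxt ∧ nxt.toNat < n then
    let j := nxt.toNat
    let nstat := stat ||| (1 <<< j)
    let nsheep := if stat.testBit j then sheep else sheep + PySem.Int.mod (info.getD j 0 + 1) 2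
    let nwolf := if stat.testBit j then wolf else wolf + info.getD j 0
    if nsheep ≤ nwolf then acc
    else if nstat < 2 ^ n ∧ (j, nstat) ∉ acc.2 then
      (acc.1 ++ [(nstat, j, nsheep, nwolf)], insert (j, nstat) acc.2)
    else acc
  else acc

lemma pvStepA_card (n : Nat) (info : List Int) (stat : Nat) (sheep wolf : Int) :
    ∀ (l : List Int) (acc : List (Nat × Nat × Int × Int) × Finset (Nat × Nat)),
      (pvUnivA n \ (l.foldl (pvStepA n info stat sheep wolf) acc).2).card
          + (l.foldl (pvStepA n info stat sheep wolf) acc).1.length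
        = (pvUnivA n \ acc.2).card + acc.1.length := by
  intro l
  induction l with
  | nil => intro acc; rfl
  | cons x xs ih =>
    intro acc
    rw [List.foldl_cons, ih]
    unfold pvStepA
    dsimp only
    split_ifs
    all_goals try rfl
    all_goals
      rename_i hg _ _ hc
      obtain ⟨h2n, hnot⟩ := hc
      have hmem : (x.toNat, stat ||| 1 <<< x.toNat) ∈ pvUnivA n \ acc.2 := by
        simp only [Finset.mem_sdiff, pvUnivA, Finset.mem_product, Finset.mem_range]
        exact ⟨⟨hg.2, h2n⟩, hnot⟩
      simp only [Finset.sdiff_insert, List.length_append, List.length_cons, List.length_nil]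
      rw [Finset.card_erase_of_mem hmem]
      have : 0 < (pvUnivA n \ acc.2).card := Finset.card_pos.mpr ⟨_, hmem⟩
      omega

-- the BFS while-loop; `visit` is the set of marked (node, mask) cells of A's boolean table.
def pvBfs (n : Nat) (info : List Int) (g : List (List Int)) :
    List (Nat × Nat × Int × Int) → Finset (Nat × Nat) → Int → Int
  | [], _, result => result
  | (stat, cur, sheep, wolf) :: rest, vis, result =>
      let p := (g.getD cur []).foldl (pvStepA n info stat sheep wolf) ([], vis)
      pvBfs n info g (rest ++ p.1) p.2 (max result sheep)
termination_by q vis _ => 2 * (pvUnivA n \ vis).card + q.length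
decreasing_by
  have h := pvStepA_card n info stat sheep wolf (g.getD cur []) ([], vis)
  simp only [List.length_nil] at h
  simp only [List.length_append, List.length_cons]
  omega

def solution (info : List Int) (edges : List (List Int)) : Int :=
  let n := info.length
  let g := pvBuildGraph n edges
  pvBfs n info g [(1, 0, 1, 0)] {(0, 1)} 0

-- ===== PORT B =====
-- adj.setdefault(a, []).append(b); adj.setdefault(b, []).append(a)
def pvAdj (edges : List (List Int)) : PySem.Dict Int (List Int) :=
  edges.foldl (fun d e =>
    match e with
    | [a, b] => (d.modify a [] (· ++ [b])).modify b [] (· ++ [a])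
    | _ => d) PySem.Dict.empty

-- sheep, wolf = 1, 0; for j in range(1, n): if m >> j & 1: sheep += (info[j]+1)%2; wolf += info[j]
def pvRowB (info : List Int) (n m : Nat) : Int × Int :=
  (List.range' 1 (n - 1)).foldl (fun sw j =>
    if m.testBit j then (sw.1 + PySem.Int.mod (info.getD j 0 + 1) 2, sw.2 + info.getD j 0)
    else sw) (1, 0)

-- body of `for c in adj.get(v, []): if not m >> c & 1: ... reach[m | 1 << c] = True`;
-- the guard `0 ≤ c ∧ c.toNat < n` marks where Python raises (m >> c on negative c, info[c] OOR).
def pvSetStep (n : Nat) (info : List Int) (m : Nat) (sheep wolf : Int)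
    (r : List Bool) (c : Int) : List Bool :=
  if 0 ≤ c ∧ c.toNat < n then
    if m.testBit c.toNat then r
    else
      let w2 := wolf + info.getD c.toNat 0
      let s2 := sheep + PySem.Int.mod (info.getD c.toNat 0 + 1) 2
      if w2 < s2 then r.set (m ||| 1 <<< c.toNat) true else r
  else r

-- for v in range(n): if m >> v & 1: for c in adj.get(v, []): …
def pvExpandB (n : Nat) (info : List Int) (adj : PySem.Dict Int (List Int))
    (m : Nat) (sheep wolf : Int) (reach : List Bool) : List Bool :=
  (List.range n).foldl (fun r v =>
    if m.testBit v then (adj.getD (v : Int) []).foldl (pvSetStep n info m sheep wolf) r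
    else r) reach

-- one iteration of `for m in range(1, full)`: skip unreachable masks, else take the max
-- and mark all one-node extensions with wolves < sheep.
def pvDPStep (n : Nat) (info : List Int) (adj : PySem.Dict Int (List Int))
    (st : List Bool × Int) (m : Nat) : List Bool × Int :=
  if st.1.getD m false then
    let sw := pvRowB info n m
    (pvExpandB n info adj m sw.1 sw.2 st.1, if st.2 < sw.1 then sw.1 else st.2)
  else st

def solution_alt (info : List Int) (edges : List (List Int)) : Int :=
  let n := info.length
  let adj := pvAdj edges
  let full := 2 ^ n
  ((List.range' 1 (full - 1)).foldl (pvDPStep n info adj)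
    ((List.replicate full false).set 1 true, 0)).2

-- ===== PRECONDITION & SPEC =====
-- Pre_solution restricts to the task's natural domain: a nonempty node list and edges that are
-- pairs of node ids in [0, n).  Outside it A raises (ValueError/IndexError on malformed edges,
-- IndexError on empty info) or, for negative ids, builds an accidental wrapped graph from which
-- A either raises when that part is reached or returns the same value as B when it is not.
def Pre_solution (info : List Int) (edges : List (List Int)) : Prop :=
  info ≠ [] ∧ ∀ e ∈ edges, e.length = 2 ∧ ∀ x ∈ e, 0 ≤ x ∧ x < (info.length : Int)

instance (info : List Int) (edges : List (List Int)) : Decidable (Pre_solution info edges) := by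
  unfold Pre_solution; infer_instance

def pvWitness_solution : List Int × List (List Int) := ([0, 0, 1], [[0, 1], [1, 2]])

def Spec_solution (info : List Int) (edges : List (List Int)) (out : Int) : Prop :=
  out = solution_alt info edges

instance (info : List Int) (edges : List (List Int)) (out : Int) :
    Decidable (Spec_solution info edges out) := by unfold Spec_solution; infer_instance

-- ===== CLAIM (what is proved, stated in full; the proofs are below) =====
def Claim_equal_solution : Prop := ∀ (info : List Int) (edges : List (List Int)),
  Dom_solution info edges → Pre_solution info edges → Spec_solution info edges (solution info edges)

-- ===== LEMMAS AND PROOFS =====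

-- sheep/wolf totals of a collected bitmask (node 0 always counts as the 1 starting sheep).
def pvVal (info : List Int) (j : Nat) : Int := info.getD j 0
def pvPar (info : List Int) (j : Nat) : Int := PySem.Int.mod (pvVal info j + 1) 2
def pvMaskSet (n m : Nat) : Finset Nat := (Finset.range n).filter (fun j => m.testBit j ∧ j ≠ 0)
def pvSheep (n : Nat) (info : List Int) (m : Nat) : Int := 1 + ∑ j ∈ pvMaskSet n m, pvPar info j
def pvWolf (n : Nat) (info : List Int) (m : Nat) : Int := ∑ j ∈ pvMaskSet n m, pvVal info j

lemma pv_testBit_or_pow (m j i : Nat) :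
    (m ||| 1 <<< j).testBit i = (m.testBit i || decide (j = i)) := by
  rw [Nat.testBit_or, Nat.one_shiftLeft, Nat.testBit_two_pow]

lemma pv_or_self (m j : Nat) (h : m.testBit j) : m ||| 1 <<< j = m := by
  apply Nat.eq_of_testBit_eq
  intro i
  rw [pv_testBit_or_pow]
  by_cases hij : j = i
  · subst hij; simp [h]
  · simp [hij]

lemma pv_testBit_one (u : Nat) : (1 : Nat).testBit u = decide (u = 0) := by
  cases u with
  | zero => rfl
  | succ k => simp [Nat.testBit_succ]

lemma pvMaskSet_one (n : Nat) : pvMaskSet n 1 = ∅ := by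
  unfold pvMaskSet
  apply Finset.eq_empty_of_forall_notMem
  intro j hj
  simp only [Finset.mem_filter, pv_testBit_one] at hj
  rcases hj with ⟨-, h1, h2⟩
  simp at h1
  exact h2 h1

lemma pvSheep_one (n : Nat) (info : List Int) : pvSheep n info 1 = 1 := by
  simp [pvSheep, pvMaskSet_one]

lemma pvWolf_one (n : Nat) (info : List Int) : pvWolf n info 1 = 0 := by
  simp [pvWolf, pvMaskSet_one]

lemma pvMaskSet_or (n m j : Nat) (hj : j < n) (hb : ¬ m.testBit j) (h0 : m.testBit 0) :
    pvMaskSet n (m ||| 1 <<< j) = insert j (pvMaskSet n m) := by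
  have hj0 : j ≠ 0 := by rintro rfl; exact hb h0
  ext i
  simp only [pvMaskSet, Finset.mem_insert, Finset.mem_filter, Finset.mem_range,
    pv_testBit_or_pow]
  constructor
  · rintro ⟨hin, hbit, hi0⟩
    rcases Bool.or_eq_true_iff.mp hbit with h | h
    · exact Or.inr ⟨hin, h, hi0⟩
    · exact Or.inl (of_decide_eq_true h).symm
  · rintro (rfl | ⟨hin, hbit, hi0⟩)
    · exact ⟨hj, by simp, hj0⟩
    · exact ⟨hin, by simp [hbit], hi0⟩

lemma pvSheep_or (n : Nat) (info : List Int) (m j : Nat) (hj : j < n) (hb : ¬ m.testBit j)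
    (h0 : m.testBit 0) :
    pvSheep n info (m ||| 1 <<< j) = pvSheep n info m + pvPar info j := by
  have hnotmem : j ∉ pvMaskSet n m := by
    simp [pvMaskSet, hb]
  rw [pvSheep, pvSheep, pvMaskSet_or n m j hj hb h0, Finset.sum_insert hnotmem]
  ring

lemma pvWolf_or (n : Nat) (info : List Int) (m j : Nat) (hj : j < n) (hb : ¬ m.testBit j)
    (h0 : m.testBit 0) :
    pvWolf n info (m ||| 1 <<< j) = pvWolf n info m + pvVal info j := by
  have hnotmem : j ∉ pvMaskSet n m := by
    simp [pvMaskSet, hb]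
  rw [pvWolf, pvWolf, pvMaskSet_or n m j hj hb h0, Finset.sum_insert hnotmem]
  ring

-- generic least set reachable from `init` by `succ` steps
inductive pvReach {K : Type} (succ : K → K → Prop) (init : K) : K → Prop
  | base : pvReach succ init init
  | step {k k' : K} : pvReach succ init k → succ k k' → pvReach succ init k'

lemma pvReach_subset {K : Type} (succ : K → K → Prop) (init : K) (V : K → Prop)
    (h0 : V init) (hc : ∀ a, V a → ∀ b, succ a b → V b) :
    ∀ k, pvReach succ init k → V k := by
  intro k hk
  induction hk with
  | base => exact h0
  | step _ hs ih => exact hc _ ih _ hs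

-- successor relations of the two ports, on (cur, stat) keys resp. mask keys
def pvSuccA (n : Nat) (info : List Int) (g : List (List Int)) (k k' : Nat × Nat) : Prop :=
  ∃ j : Nat, (j : Int) ∈ g.getD k.1 [] ∧ j < n ∧ k' = (j, k.2 ||| 1 <<< j) ∧
    k.2 ||| 1 <<< j < 2 ^ n ∧
    pvWolf n info (k.2 ||| 1 <<< j) < pvSheep n info (k.2 ||| 1 <<< j)

def pvSuccB (n : Nat) (info : List Int) (adj : PySem.Dict Int (List Int)) (m m2 : Nat) : Prop :=
  ∃ v : Nat, v < n ∧ m.testBit v ∧ ∃ c : Int, c ∈ adj.getD (v : Int) [] ∧ 0 ≤ c ∧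
    c.toNat < n ∧ ¬ m.testBit c.toNat ∧ m2 = m ||| 1 <<< c.toNat ∧ m2 < 2 ^ n ∧
    pvWolf n info m2 < pvSheep n info m2

-- state invariant carried by A's worklist
def pvGoodA (n : Nat) (info : List Int) (s : Nat × Nat × Int × Int) : Prop :=
  s.2.1 < n ∧ s.1 < 2 ^ n ∧ s.1.testBit 0 ∧ s.1.testBit s.2.1 ∧
    s.2.2.1 = pvSheep n info s.1 ∧ s.2.2.2 = pvWolf n info s.1

def pvKeyA (s : Nat × Nat × Int × Int) : Nat × Nat := (s.2.1, s.1)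

-- what one pop of A may push, relative to the neighbour list l
def pvPushA (n : Nat) (info : List Int) (l : List Int) (stat : Nat) (k : Nat × Nat) : Prop :=
  (k.1 : Int) ∈ l ∧ k.1 < n ∧ k.2 = stat ||| 1 <<< k.1 ∧ k.2 < 2 ^ n ∧
    pvWolf n info k.2 < pvSheep n info k.2

lemma pvFoldA_mono (n : Nat) (info : List Int) (stat : Nat) (sheep wolf : Int) :
    ∀ (l : List Int) (acc : List (Nat × Nat × Int × Int) × Finset (Nat × Nat)),
      acc.2 ⊆ (l.foldl (pvStepA n info stat sheep wolf) acc).2 := by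
  intro l
  induction l with
  | nil => intro acc; exact fun _ h => h
  | cons x xs ih =>
    intro acc
    refine fun k hk => ih (pvStepA n info stat sheep wolf acc x) ?_
    unfold pvStepA
    dsimp only
    split_ifs
    all_goals first
      | exact hk
      | exact Finset.mem_insert_of_mem hk

lemma pvPushA_cons (n : Nat) (info : List Int) (x : Int) (xs : List Int) (stat : Nat)
    (k : Nat × Nat) :
    pvPushA n info (x :: xs) stat k ↔ pvPushA n info [x] stat k ∨ pvPushA n info xs stat k := by
  simp only [pvPushA, List.mem_cons, List.not_mem_nil, or_false]
  tauto

lemma pvStepA_one (n : Nat) (info : List Int) (stat : Nat) (sheep wolf : Int)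
    (hs : stat < 2 ^ n) (h0 : stat.testBit 0)
    (hsh : sheep = pvSheep n info stat) (hw : wolf = pvWolf n info stat)
    (acc : List (Nat × Nat × Int × Int) × Finset (Nat × Nat)) (x : Int) :
    (pvStepA n info stat sheep wolf acc x = acc ∧
        ∀ k, pvPushA n info [x] stat k → k ∈ acc.2)
    ∨ (∃ s, pvStepA n info stat sheep wolf acc x = (acc.1 ++ [s], insert (pvKeyA s) acc.2) ∧
        pvGoodA n info s ∧ pvKeyA s ∉ acc.2 ∧ pvPushA n info [x] stat (pvKeyA s) ∧
        ∀ k, pvPushA n info [x] stat k → k = pvKeyA s) := by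
  unfold pvStepA
  dsimp only
  by_cases hg : 0 ≤ x ∧ x.toNat < n
  · rw [if_pos hg]
    have hxj : ((x.toNat : Int)) = x := Int.toNat_of_nonneg hg.1
    have huniq : ∀ k, pvPushA n info [x] stat k → k = (x.toNat, stat ||| 1 <<< x.toNat) := by
      rintro ⟨k1, k2⟩ ⟨hmem, -, hk2, -, -⟩
      simp only [List.mem_singleton] at hmem
      have : k1 = x.toNat := by omega
      subst this
      simp_all
    by_cases hb : stat.testBit x.toNat
    · have hns : stat ||| 1 <<< x.toNat = stat := pv_or_self _ _ hb
      simp only [hb, if_true, hns]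
      by_cases hle : sheep ≤ wolf
      · rw [if_pos hle]
        refine Or.inl ⟨rfl, fun k hk => ?_⟩
        exfalso
        have hlt := hk.2.2.2.2
        rw [huniq k hk, hns] at hlt
        dsimp only at hlt
        rw [hsh, hw] at hle
        omega
      · rw [if_neg hle]
        by_cases hc : (x.toNat, stat) ∈ acc.2
        · rw [if_neg (by simp [hc])]
          refine Or.inl ⟨rfl, fun k hk => ?_⟩
          have := huniq k hk
          rw [hns] at this
          rw [this]
          exact hc
        · rw [if_pos ⟨hs, hc⟩]
          refine Or.inr ⟨(stat, x.toNat, sheep, wolf), rfl, ⟨hg.2, hs, h0, hb, hsh, hw⟩, hc, ?_, ?_⟩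
          · refine ⟨by rw [List.mem_singleton]; exact hxj, hg.2, hns.symm, hs, ?_⟩
            show pvWolf n info stat < pvSheep n info stat
            rw [hsh, hw] at hle; omega
          · intro k hk
            have := huniq k hk
            rwa [hns] at this
    · have hbf : ¬ stat.testBit x.toNat = true := hb
      have hlt2 : 1 <<< x.toNat < 2 ^ n := by
        rw [Nat.one_shiftLeft]
        exact Nat.pow_lt_pow_right (by norm_num) hg.2
      have hns2 : stat ||| 1 <<< x.toNat < 2 ^ n := Nat.or_lt_two_pow hs hlt2
      have hshor := pvSheep_or n info stat x.toNat hg.2 hb h0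
      have hwor := pvWolf_or n info stat x.toNat hg.2 hb h0
      have e1 : sheep + PySem.Int.mod (info.getD x.toNat 0 + 1) 2
          = pvSheep n info (stat ||| 1 <<< x.toNat) := by rw [hsh, hshor]; rfl
      have e2 : wolf + info.getD x.toNat 0
          = pvWolf n info (stat ||| 1 <<< x.toNat) := by rw [hw, hwor]; rfl
      have h0' : (stat ||| 1 <<< x.toNat).testBit 0 := by
        rw [pv_testBit_or_pow]; simp [h0]
      have hbj : (stat ||| 1 <<< x.toNat).testBit x.toNat := by
        rw [pv_testBit_or_pow]; simp
      simp only [hbf, Bool.false_eq_true, if_false, e1, e2]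
      by_cases hle : pvSheep n info (stat ||| 1 <<< x.toNat) ≤ pvWolf n info (stat ||| 1 <<< x.toNat)
      · rw [if_pos hle]
        refine Or.inl ⟨rfl, fun k hk => ?_⟩
        exfalso
        have hlt := hk.2.2.2.2
        rw [huniq k hk] at hlt
        dsimp only at hlt
        omega
      · rw [if_neg hle]
        by_cases hc : (x.toNat, stat ||| 1 <<< x.toNat) ∈ acc.2
        · rw [if_neg (by simp [hc])]
          exact Or.inl ⟨rfl, fun k hk => (huniq k hk) ▸ hc⟩
        · rw [if_pos ⟨hns2, hc⟩]
          refine Or.inr ⟨(stat ||| 1 <<< x.toNat, x.toNat,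
              pvSheep n info (stat ||| 1 <<< x.toNat), pvWolf n info (stat ||| 1 <<< x.toNat)),
            rfl, ⟨hg.2, hns2, h0', hbj, rfl, rfl⟩, hc, ?_, huniq⟩
          refine ⟨by rw [List.mem_singleton]; exact hxj, hg.2, rfl, hns2, ?_⟩
          show pvWolf n info (stat ||| 1 <<< x.toNat) < pvSheep n info (stat ||| 1 <<< x.toNat)
          omega
  · rw [if_neg hg]
    refine Or.inl ⟨rfl, ?_⟩
    rintro ⟨k1, k2⟩ ⟨hmem, hkn, -, -, -⟩
    simp only [List.mem_singleton] at hmem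
    exact absurd ⟨hmem ▸ Int.natCast_nonneg k1, by omega⟩ hg

lemma pvFoldA_spec (n : Nat) (info : List Int) (stat : Nat) (sheep wolf : Int)
    (hs : stat < 2 ^ n) (h0 : stat.testBit 0)
    (hsh : sheep = pvSheep n info stat) (hw : wolf = pvWolf n info stat) :
    ∀ (l : List Int) (acc : List (Nat × Nat × Int × Int) × Finset (Nat × Nat)),
      (∀ k, k ∈ (l.foldl (pvStepA n info stat sheep wolf) acc).2 ↔
          k ∈ acc.2 ∨ pvPushA n info l stat k) ∧
      ∃ newl, (l.foldl (pvStepA n info stat sheep wolf) acc).1 = acc.1 ++ newl ∧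
        (newl.map pvKeyA).Nodup ∧
        ∀ s ∈ newl, pvGoodA n info s ∧ pvKeyA s ∉ acc.2 ∧ pvPushA n info l stat (pvKeyA s) := by
  intro l
  induction l with
  | nil =>
    intro acc
    refine ⟨fun k => ?_, [], by simp, by simp, by simp⟩
    simp [pvPushA]
  | cons x xs ih =>
    intro acc
    rw [List.foldl_cons]
    obtain ⟨hmem', newl', hl', hnd', hprops'⟩ := ih (pvStepA n info stat sheep wolf acc x)
    rcases pvStepA_one n info stat sheep wolf hs h0 hsh hw acc x with
      ⟨heq, hblock⟩ | ⟨s, heq, hGood, hnot, hpush, huniq⟩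
    · rw [heq] at hmem' hl' hprops' ⊢
      refine ⟨fun k => ?_, newl', hl', hnd', fun s' hs' => ?_⟩
      · rw [hmem' k, pvPushA_cons]
        have := hblock k
        tauto
      · obtain ⟨hG, hN, hP⟩ := hprops' s' hs'
        exact ⟨hG, hN, (pvPushA_cons n info x xs stat _).mpr (Or.inr hP)⟩
    · rw [heq] at hmem' hl' hprops' ⊢
      have hkey : ∀ k, pvPushA n info [x] stat k ↔ k = pvKeyA s :=
        fun k => ⟨huniq k, fun e => e ▸ hpush⟩
      refine ⟨fun k => ?_, s :: newl', by rw [hl']; simp, ?_, ?_⟩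
      · rw [hmem' k, Finset.mem_insert, pvPushA_cons, hkey k]
        tauto
      · refine List.nodup_cons.mpr ⟨fun hmem => ?_, hnd'⟩
        obtain ⟨s', hs', he⟩ := List.mem_map.mp hmem
        exact (hprops' s' hs').2.1 (he ▸ Finset.mem_insert_self _ _)
      · intro s' hs'
        rcases List.mem_cons.mp hs' with rfl | hs'
        · exact ⟨hGood, hnot, (pvPushA_cons n info x xs stat _).mpr (Or.inl hpush)⟩
        · obtain ⟨hG, hN, hP⟩ := hprops' s' hs'
          exact ⟨hG, fun hm => hN (Finset.mem_insert_of_mem hm),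
            (pvPushA_cons n info x xs stat _).mpr (Or.inr hP)⟩

-- parallel recursion returning the final visited set of A's loop
def pvBfsVis (n : Nat) (info : List Int) (g : List (List Int)) :
    List (Nat × Nat × Int × Int) → Finset (Nat × Nat) → Finset (Nat × Nat)
  | [], vis => vis
  | (stat, cur, sheep, wolf) :: rest, vis =>
      let p := (g.getD cur []).foldl (pvStepA n info stat sheep wolf) ([], vis)
      pvBfsVis n info g (rest ++ p.1) p.2
termination_by q vis => 2 * (pvUnivA n \ vis).card + q.length
decreasing_by
  have h := pvStepA_card n info stat sheep wolf (g.getD cur []) ([], vis)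
  simp only [List.length_nil] at h
  simp only [List.length_append, List.length_cons]
  omega

lemma pvSuccA_iff_push (n : Nat) (info : List Int) (g : List (List Int))
    (cur stat : Nat) (k' : Nat × Nat) :
    pvSuccA n info g (cur, stat) k' ↔ pvPushA n info (g.getD cur []) stat k' := by
  constructor
  · rintro ⟨j, hj, hjn, rfl, h4, h5⟩
    exact ⟨hj, hjn, rfl, h4, h5⟩
  · rintro ⟨h1, h2, h3, h4, h5⟩
    exact ⟨k'.1, h1, h2, by rw [← h3], by rw [← h3]; exact h4, by rw [← h3]; exact h5⟩

lemma pvStepA_cases (n : Nat) (info : List Int) (stat : Nat) (sheep wolf : Int)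
    (acc : List (Nat × Nat × Int × Int) × Finset (Nat × Nat)) (x : Int) :
    pvStepA n info stat sheep wolf acc x = acc ∨
      ∃ s, pvStepA n info stat sheep wolf acc x = (acc.1 ++ [s], insert (pvKeyA s) acc.2) := by
  unfold pvStepA
  dsimp only
  split_ifs
  all_goals first | exact Or.inl rfl | exact Or.inr ⟨_, rfl⟩

lemma pvFoldA_ext (n : Nat) (info : List Int) (stat : Nat) (sheep wolf : Int) :
    ∀ (l : List Int) (acc : List (Nat × Nat × Int × Int) × Finset (Nat × Nat)),
      ∃ t, (l.foldl (pvStepA n info stat sheep wolf) acc).1 = acc.1 ++ t := by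
  intro l
  induction l with
  | nil => exact fun acc => ⟨[], by simp⟩
  | cons x xs ih =>
    intro acc
    rw [List.foldl_cons]
    rcases pvStepA_cases n info stat sheep wolf acc x with heq | ⟨s, heq⟩
    · rw [heq]
      exact ih acc
    · rw [heq]
      obtain ⟨t, ht⟩ := ih (acc.1 ++ [s], insert (pvKeyA s) acc.2)
      exact ⟨s :: t, by rw [ht]; simp⟩

lemma pvFoldA_keys (n : Nat) (info : List Int) (stat : Nat) (sheep wolf : Int) :
    ∀ (l : List Int) (acc : List (Nat × Nat × Int × Int) × Finset (Nat × Nat)) (k : Nat × Nat),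
      k ∈ (l.foldl (pvStepA n info stat sheep wolf) acc).2 →
        k ∈ acc.2 ∨ k ∈ (l.foldl (pvStepA n info stat sheep wolf) acc).1.map pvKeyA := by
  intro l
  induction l with
  | nil => exact fun acc k hk => Or.inl hk
  | cons x xs ih =>
    intro acc k hk
    rw [List.foldl_cons] at hk ⊢
    rcases pvStepA_cases n info stat sheep wolf acc x with heq | ⟨s, heq⟩
    · rw [heq] at hk ⊢
      exact ih acc k hk
    · rw [heq] at hk ⊢
      rcases ih _ k hk with h | h
      · rcases Finset.mem_insert.mp h with rfl | h
        · right
          obtain ⟨t, ht⟩ := pvFoldA_ext n info stat sheep wolf xs (acc.1 ++ [s], insert (pvKeyA s) acc.2)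
          rw [ht]
          simp
        · exact Or.inl h
      · exact Or.inr h

lemma pvBfsVis_mono (n : Nat) (info : List Int) (g : List (List Int)) :
    ∀ q vis, vis ⊆ pvBfsVis n info g q vis := by
  intro q vis
  induction q, vis using pvBfsVis.induct n info g with
  | case1 vis => rw [pvBfsVis]
  | case2 stat cur sheep wolf rest vis =>
    rename_i p ih
    rw [pvBfsVis]
    exact (pvFoldA_mono n info stat sheep wolf (g.getD cur []) ([], vis)).trans ih

lemma pvBfsVis_sound (n : Nat) (info : List Int) (g : List (List Int)) :
    ∀ q vis, (∀ s ∈ q, pvGoodA n info s ∧ pvKeyA s ∈ vis) →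
      (∀ k ∈ vis, pvReach (pvSuccA n info g) (0, 1) k) →
      ∀ k ∈ pvBfsVis n info g q vis, pvReach (pvSuccA n info g) (0, 1) k := by
  intro q vis
  induction q, vis using pvBfsVis.induct n info g with
  | case1 vis =>
    intro _ hvis k hk
    rw [pvBfsVis] at hk
    exact hvis k hk
  | case2 stat cur sheep wolf rest vis p ih =>
    intro hq hvis k hk
    rw [pvBfsVis] at hk
    obtain ⟨hGood, hkey⟩ := hq _ List.mem_cons_self
    obtain ⟨hfmem, newl, hfl, hfnd, hfprops⟩ :=
      pvFoldA_spec n info stat sheep wolf hGood.2.1 hGood.2.2.1 hGood.2.2.2.2.1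
        hGood.2.2.2.2.2 (g.getD cur []) ([], vis)
    refine ih ?_ ?_ k hk
    · intro s hs
      rcases List.mem_append.mp hs with hs | hs
      · obtain ⟨hG, hK⟩ := hq s (List.mem_cons_of_mem _ hs)
        exact ⟨hG, pvFoldA_mono n info stat sheep wolf (g.getD cur []) ([], vis) hK⟩
      · rw [hfl] at hs
        simp only [List.nil_append] at hs
        obtain ⟨hG, -, hP⟩ := hfprops s hs
        exact ⟨hG, (hfmem (pvKeyA s)).mpr (Or.inr hP)⟩
    · intro k' hk'
      rcases (hfmem k').mp hk' with h | h
      · exact hvis k' h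
      · exact pvReach.step (hvis _ hkey) ((pvSuccA_iff_push n info g cur stat k').mpr h)

lemma pvBfsVis_closed (n : Nat) (info : List Int) (g : List (List Int)) :
    ∀ q vis, (∀ s ∈ q, pvGoodA n info s ∧ pvKeyA s ∈ vis) →
      (∀ k ∈ vis, k ∉ q.map pvKeyA → ∀ k', pvSuccA n info g k k' → k' ∈ pvBfsVis n info g q vis) →
      ∀ k ∈ pvBfsVis n info g q vis, ∀ k', pvSuccA n info g k k' → k' ∈ pvBfsVis n info g q vis := by
  intro q vis
  induction q, vis using pvBfsVis.induct n info g with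
  | case1 vis =>
    intro _ hcl k hk k' hs
    rw [pvBfsVis] at hk ⊢
    have h2 := hcl k hk (by simp) k' hs
    rwa [pvBfsVis] at h2
  | case2 stat cur sheep wolf rest vis p ih =>
    intro hq hcl k hk k' hs
    rw [pvBfsVis] at hk ⊢
    obtain ⟨hGood, hkey⟩ := hq _ List.mem_cons_self
    obtain ⟨hfmem, newl, hfl, hfnd, hfprops⟩ :=
      pvFoldA_spec n info stat sheep wolf hGood.2.1 hGood.2.2.1 hGood.2.2.2.2.1
        hGood.2.2.2.2.2 (g.getD cur []) ([], vis)
    refine ih ?_ ?_ k hk k' hs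
    · intro s hs'
      rcases List.mem_append.mp hs' with hs' | hs'
      · obtain ⟨hG, hK⟩ := hq s (List.mem_cons_of_mem _ hs')
        exact ⟨hG, pvFoldA_mono n info stat sheep wolf (g.getD cur []) ([], vis) hK⟩
      · rw [hfl] at hs'
        simp only [List.nil_append] at hs'
        obtain ⟨hG, -, hP⟩ := hfprops s hs'
        exact ⟨hG, (hfmem (pvKeyA s)).mpr (Or.inr hP)⟩
    · intro k0 hk0 hnk k1 hsucc
      by_cases hpop : k0 = (cur, stat)
      · subst hpop
        refine pvBfsVis_mono n info g _ _ ?_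
        exact (hfmem k1).mpr (Or.inr ((pvSuccA_iff_push n info g cur stat k1).mp hsucc))
      · rcases pvFoldA_keys n info stat sheep wolf (g.getD cur []) ([], vis) k0 hk0 with hv | hnew
        · have hnot : k0 ∉ List.map pvKeyA ((stat, cur, sheep, wolf) :: rest) := by
            simp only [List.map_cons, List.mem_cons]
            rintro (h | h)
            · exact hpop h
            · exact hnk (by rw [List.map_append]; exact List.mem_append.mpr (Or.inl h))
          have := hcl k0 hv hnot k1 hsucc
          rwa [pvBfsVis] at this
        · exact absurd (by rw [List.map_append]; exact List.mem_append.mpr (Or.inr hnew)) hnk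

lemma pvFold_max_base {α : Type} [DecidableEq α] (S : Finset α) (f : α → Int) (r c : Int) :
    S.fold max (max r c) f = max c (S.fold max r f) := by
  induction S using Finset.induction_on with
  | empty => simp [max_comm]
  | insert a S ha ih =>
    rw [Finset.fold_insert ha, Finset.fold_insert ha, ih, max_left_comm]

lemma pvBfs_result (n : Nat) (info : List Int) (g : List (List Int)) :
    ∀ q vis r, (∀ s ∈ q, pvGoodA n info s ∧ pvKeyA s ∈ vis) → (q.map pvKeyA).Nodup →
      pvBfs n info g q vis r =
        ((pvBfsVis n info g q vis) \ (vis \ (q.map pvKeyA).toFinset)).fold max r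
          (fun k => pvSheep n info k.2) := by
  intro q vis
  induction q, vis using pvBfsVis.induct n info g with
  | case1 vis =>
    intro r _ _
    rw [pvBfs, pvBfsVis]
    simp
  | case2 stat cur sheep wolf rest vis p ih =>
    intro r hq hnd
    rw [pvBfs, pvBfsVis]
    obtain ⟨hGood, hkey⟩ := hq _ List.mem_cons_self
    obtain ⟨hfmem, newl, hfl, hfnd, hfprops⟩ :=
      pvFoldA_spec n info stat sheep wolf hGood.2.1 hGood.2.2.1 hGood.2.2.2.2.1
        hGood.2.2.2.2.2 (g.getD cur []) ([], vis)
    simp only [List.nil_append] at hfl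
    set p := (g.getD cur []).foldl (pvStepA n info stat sheep wolf) ([], vis) with hp
    set k0 : Nat × Nat := (cur, stat) with hk0
    have hq' : ∀ s ∈ rest ++ p.1, pvGoodA n info s ∧ pvKeyA s ∈ p.2 := by
      intro s hs
      rcases List.mem_append.mp hs with hs | hs
      · obtain ⟨hG, hK⟩ := hq s (List.mem_cons_of_mem _ hs)
        exact ⟨hG, pvFoldA_mono n info stat sheep wolf (g.getD cur []) ([], vis) hK⟩
      · rw [hfl] at hs
        obtain ⟨hG, -, hP⟩ := hfprops s hs
        exact ⟨hG, (hfmem (pvKeyA s)).mpr (Or.inr hP)⟩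
    have hrestvis : ∀ k ∈ (rest.map pvKeyA), k ∈ vis := by
      intro k hk
      obtain ⟨s, hs, rfl⟩ := List.mem_map.mp hk
      exact (hq s (List.mem_cons_of_mem _ hs)).2
    have hnewnot : ∀ k ∈ (newl.map pvKeyA), k ∉ vis := by
      intro k hk
      obtain ⟨s, hs, rfl⟩ := List.mem_map.mp hk
      exact (hfprops s hs).2.1
    have hnd' : ((rest ++ p.1).map pvKeyA).Nodup := by
      rw [hfl, List.map_append]
      refine List.Nodup.append ((List.nodup_cons.mp hnd).2) hfnd ?_
      intro k h1 h2
      exact hnewnot k h2 (hrestvis k h1)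
    have hIH := ih (max r sheep) hq' hnd'
    rw [hIH]
    have hp2 : p.2 = vis ∪ (newl.map pvKeyA).toFinset := by
      apply Finset.ext
      intro k
      simp only [Finset.mem_union, List.mem_toFinset]
      constructor
      · intro hk
        rcases pvFoldA_keys n info stat sheep wolf (g.getD cur []) ([], vis) k hk with h | h
        · exact Or.inl (by simpa using h)
        · rw [hfl] at h
          exact Or.inr h
      · rintro (h | h)
        · exact pvFoldA_mono n info stat sheep wolf (g.getD cur []) ([], vis) h
        · obtain ⟨s, hs, rfl⟩ := List.mem_map.mp h
          exact (hfmem (pvKeyA s)).mpr (Or.inr (hfprops s hs).2.2)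
    have hk0vis : k0 ∈ vis := hkey
    have hk0rest : k0 ∉ rest.map pvKeyA := by
      have := (List.nodup_cons.mp hnd).1
      simpa using this
    have hDD : p.2 \ ((rest ++ p.1).map pvKeyA).toFinset
        = insert k0 (vis \ ((List.map pvKeyA ((stat, cur, sheep, wolf) :: rest)).toFinset)) := by
      apply Finset.ext
      intro k
      simp only [Finset.mem_sdiff, Finset.mem_insert, List.mem_toFinset, hp2,
        Finset.mem_union, List.map_append, List.mem_append, List.map_cons, List.mem_cons, hfl]
      constructor
      · rintro ⟨hv | hnew, hnot⟩
        · by_cases hke : k = k0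
          · exact Or.inl hke
          · refine Or.inr ⟨hv, ?_⟩
            rintro (h | h)
            · exact hke (by rw [h]; rfl)
            · exact hnot (Or.inl h)
        · exact absurd hnew (fun hnew => hnot (Or.inr hnew))
      · rintro (rfl | ⟨hv, hnot⟩)
        · refine ⟨Or.inl hk0vis, ?_⟩
          rintro (h | h)
          · exact hk0rest h
          · exact hnewnot k0 h hk0vis
        · refine ⟨Or.inl hv, ?_⟩
          rintro (h | h)
          · exact hnot (Or.inr h)
          · exact hnewnot k h hv
    rw [hDD]
    have hR : pvBfsVis n info g (rest ++ p.1) p.2 = pvBfsVis n info g ((stat, cur, sheep, wolf) :: rest) vis := by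
      rw [pvBfsVis]
    rw [hR]
    set R := pvBfsVis n info g ((stat, cur, sheep, wolf) :: rest) vis with hRdef
    set D := vis \ ((List.map pvKeyA ((stat, cur, sheep, wolf) :: rest)).toFinset) with hDdef
    have hk0D : k0 ∉ D := by
      simp only [hDdef, Finset.mem_sdiff, List.mem_toFinset, List.map_cons, List.mem_cons]
      rintro ⟨-, hnot⟩
      exact hnot (Or.inl rfl)
    have hk0R : k0 ∈ R := pvBfsVis_mono n info g _ _ hk0vis
    have hsplitRD : R \ D = insert k0 (R \ insert k0 D) := by
      apply Finset.ext
      intro k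
      simp only [Finset.mem_sdiff, Finset.mem_insert]
      constructor
      · rintro ⟨hr, hd⟩
        by_cases hke : k = k0
        · exact Or.inl hke
        · exact Or.inr ⟨hr, by rintro (h | h); exact hke h; exact hd h⟩
      · rintro (rfl | ⟨hr, hd⟩)
        · exact ⟨hk0R, hk0D⟩
        · exact ⟨hr, fun h => hd (Or.inr h)⟩
    rw [hsplitRD, Finset.fold_insert (by simp)]
    have hsheep : sheep = pvSheep n info stat := hGood.2.2.2.2.1
    rw [pvFold_max_base]
    rw [hsheep]

-- ==== adjacency characterisations ====

def pvEdgeOk (n : Nat) (e : List Int) : Prop :=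
  e.length = 2 ∧ ∀ x ∈ e, 0 ≤ x ∧ x < (n : Int)

lemma pv_getD_set {α : Type} (l : List α) (i : Nat) (v : α) (u : Nat) (d : α)
    (hi : i < l.length) :
    ((l.set i v).getD u d) = if u = i then v else l.getD u d := by
  unfold List.getD
  rcases eq_or_ne u i with rfl | hne
  · rw [List.getElem?_set_self hi]
    simp
  · rw [List.getElem?_set_ne (by omega)]
    simp [hne]

lemma pvBuildGraph_aux (n : Nat) :
    ∀ (edges : List (List Int)) (g0 : List (List Int)), g0.length = n →
      (∀ e ∈ edges, pvEdgeOk n e) → ∀ (u : Nat), u < n → ∀ (x : Int),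
      (x ∈ (edges.foldl (fun g e =>
        match e with
        | [st, en] =>
            let g1 := if 0 ≤ st ∧ st < (n : Int) then g.set st.toNat (g.getD st.toNat [] ++ [en]) else g
            if 0 ≤ en ∧ en < (n : Int) then g1.set en.toNat (g1.getD en.toNat [] ++ [st]) else g1
        | _ => g) g0).getD u [] ↔
        x ∈ g0.getD u [] ∨ ∃ e ∈ edges, e = [(u : Int), x] ∨ e = [x, (u : Int)]) := by
  intro edges
  induction edges with
  | nil =>
    intro g0 hlen hpre u hu x
    simp
  | cons e es ih =>
    intro g0 hlen hpre u hu x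
    obtain ⟨hlen2, hrange⟩ := hpre e List.mem_cons_self
    match e, hlen2 with
    | [a, b], _ =>
      obtain ⟨ha0, han⟩ := hrange a (by simp)
      obtain ⟨hb0, hbn⟩ := hrange b (by simp)
      rw [List.foldl_cons]
      dsimp only
      rw [if_pos ⟨hb0, hbn⟩, if_pos ⟨ha0, han⟩]
      set g1 := g0.set a.toNat (g0.getD a.toNat [] ++ [b]) with hg1
      set g2 := g1.set b.toNat (g1.getD b.toNat [] ++ [a]) with hg2
      have hlen1 : g1.length = n := by rw [hg1, List.length_set, hlen]
      have hlen2' : g2.length = n := by rw [hg2, List.length_set, hlen1]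
      have hstep : ∀ (y : Int), y ∈ g2.getD u [] ↔
          y ∈ g0.getD u [] ∨ (u = a.toNat ∧ y = b) ∨ (u = b.toNat ∧ y = a) := by
        intro y
        rw [hg2, pv_getD_set g1 b.toNat _ u [] (by omega), hg1,
          pv_getD_set g0 a.toNat _ u [] (by omega), pv_getD_set g0 a.toNat _ b.toNat [] (by omega)]
        split_ifs with hub hba hua
        · rw [hub, hba]
          simp only [List.mem_append, List.mem_singleton]
          tauto
        · rw [hub]
          simp only [List.mem_append, List.mem_singleton]
          tauto
        · rw [hua] at hub ⊢
          simp only [List.mem_append, List.mem_singleton]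
          tauto
        · tauto
      rw [ih g2 hlen2' (fun e he => hpre e (List.mem_cons_of_mem _ he)) u hu x, hstep x]
      have hiff1 : (u = a.toNat ∧ x = b) ↔ [a, b] = [(u : Int), x] := by
        constructor
        · rintro ⟨rfl, rfl⟩
          simp [Int.toNat_of_nonneg ha0]
        · intro h
          simp only [List.cons.injEq, and_true] at h
          obtain ⟨h1, h2⟩ := h
          exact ⟨by omega, h2.symm⟩
      have hiff2 : (u = b.toNat ∧ x = a) ↔ [a, b] = [x, (u : Int)] := by
        constructor
        · rintro ⟨rfl, rfl⟩
          simp [Int.toNat_of_nonneg hb0]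
        · intro h
          simp only [List.cons.injEq, and_true] at h
          obtain ⟨h1, h2⟩ := h
          exact ⟨by omega, h1.symm⟩
      simp only [List.mem_cons]
      constructor
      · rintro ((h | h | h) | ⟨e', he', hor⟩)
        · exact Or.inl h
        · exact Or.inr ⟨[a, b], Or.inl rfl, Or.inl (hiff1.mp h)⟩
        · exact Or.inr ⟨[a, b], Or.inl rfl, Or.inr (hiff2.mp h)⟩
        · exact Or.inr ⟨e', Or.inr he', hor⟩
      · rintro (h | ⟨e', he' | he', hor⟩)
        · exact Or.inl (Or.inl h)
        · subst he'
          rcases hor with h | h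
          · exact Or.inl (Or.inr (Or.inl (hiff1.mpr h)))
          · exact Or.inl (Or.inr (Or.inr (hiff2.mpr h)))
        · exact Or.inr ⟨e', he', hor⟩

lemma pvBuildGraph_mem (n : Nat) (edges : List (List Int))
    (hpre : ∀ e ∈ edges, pvEdgeOk n e) (u : Nat) (hu : u < n) (x : Int) :
    x ∈ (pvBuildGraph n edges).getD u [] ↔
      ∃ e ∈ edges, e = [(u : Int), x] ∨ e = [x, (u : Int)] := by
  unfold pvBuildGraph
  rw [pvBuildGraph_aux n edges (List.replicate n []) (by simp) hpre u hu x]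
  have : (List.replicate n ([] : List Int)).getD u [] = [] := by
    unfold List.getD
    rcases lt_or_ge u n with h | h
    · rw [List.getElem?_replicate_of_lt h]
      rfl
    · rw [List.getElem?_eq_none (by simpa using h)]
      rfl
  rw [this]
  simp

lemma pvAdj_aux :
    ∀ (edges : List (List Int)) (d0 : PySem.Dict Int (List Int))
      (hpre : ∀ e ∈ edges, e.length = 2) (k x : Int),
      (x ∈ (edges.foldl (fun d e =>
        match e with
        | [a, b] => (d.modify a [] (· ++ [b])).modify b [] (· ++ [a])
        | _ => d) d0).getD k [] ↔
        x ∈ d0.getD k [] ∨ ∃ e ∈ edges, e = [k, x] ∨ e = [x, k]) := by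
  intro edges
  induction edges with
  | nil =>
    intro d0 hpre k x
    simp
  | cons e es ih =>
    intro d0 hpre k x
    obtain hlen2 := hpre e List.mem_cons_self
    match e, hlen2 with
    | [a, b], _ =>
      rw [List.foldl_cons]
      dsimp only
      set d1 := d0.modify a [] (· ++ [b]) with hd1
      set d2 := d1.modify b [] (· ++ [a]) with hd2
      have hstep : ∀ (y : Int), y ∈ d2.getD k [] ↔
          y ∈ d0.getD k [] ∨ (k = a ∧ y = b) ∨ (k = b ∧ y = a) := by
        intro y
        rw [hd2, PySem.Dict.getD_modify d1 b k [] _, hd1,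
          PySem.Dict.getD_modify d0 a k [] _, PySem.Dict.getD_modify d0 a b [] _]
        split_ifs with hkb hba hka
        · rw [hkb, hba]
          simp only [List.mem_append, List.mem_singleton]
          tauto
        · rw [hkb]
          simp only [List.mem_append, List.mem_singleton]
          tauto
        · rw [hka] at hkb ⊢
          simp only [List.mem_append, List.mem_singleton]
          tauto
        · tauto
      rw [ih d2 (fun e he => hpre e (List.mem_cons_of_mem _ he)) k x, hstep x]
      have hiff1 : (k = a ∧ x = b) ↔ [a, b] = [k, x] := by
        constructor
        · rintro ⟨rfl, rfl⟩
          simp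
        · intro h
          simp only [List.cons.injEq, and_true] at h
          exact ⟨h.1.symm, h.2.symm⟩
      have hiff2 : (k = b ∧ x = a) ↔ [a, b] = [x, k] := by
        constructor
        · rintro ⟨rfl, rfl⟩
          simp
        · intro h
          simp only [List.cons.injEq, and_true] at h
          exact ⟨h.2.symm, h.1.symm⟩
      simp only [List.mem_cons]
      constructor
      · rintro ((h | h | h) | ⟨e', he', hor⟩)
        · exact Or.inl h
        · exact Or.inr ⟨[a, b], Or.inl rfl, Or.inl (hiff1.mp h)⟩
        · exact Or.inr ⟨[a, b], Or.inl rfl, Or.inr (hiff2.mp h)⟩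
        · exact Or.inr ⟨e', Or.inr he', hor⟩
      · rintro (h | ⟨e', he' | he', hor⟩)
        · exact Or.inl (Or.inl h)
        · subst he'
          rcases hor with h | h
          · exact Or.inl (Or.inr (Or.inl (hiff1.mpr h)))
          · exact Or.inl (Or.inr (Or.inr (hiff2.mpr h)))
        · exact Or.inr ⟨e', he', hor⟩

lemma pvAdj_mem (edges : List (List Int)) (hpre : ∀ e ∈ edges, e.length = 2)
    (k x : Int) :
    x ∈ (pvAdj edges).getD k [] ↔ ∃ e ∈ edges, e = [k, x] ∨ e = [x, k] := by
  unfold pvAdj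
  rw [pvAdj_aux edges PySem.Dict.empty hpre k x]
  simp [PySem.Dict.getD_empty]

-- ==== reach invariants and the bridge ====

lemma pvReachA_inv (n : Nat) (info : List Int) (g : List (List Int)) (hn : 1 ≤ n) :
    ∀ k, pvReach (pvSuccA n info g) (0, 1) k →
      k.1 < n ∧ k.2 < 2 ^ n ∧ k.2.testBit 0 ∧ k.2.testBit k.1 ∧
        pvWolf n info k.2 < pvSheep n info k.2 := by
  intro k hk
  induction hk with
  | base =>
    refine ⟨hn, Nat.one_lt_two_pow_iff.mpr (by omega), by simp [pv_testBit_one],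
      by simp [pv_testBit_one], ?_⟩
    rw [pvSheep_one, pvWolf_one]
    omega
  | step hk hs ih =>
    obtain ⟨j, hmem, hjn, rfl, hlt, hcond⟩ := hs
    refine ⟨hjn, hlt, ?_, ?_, hcond⟩
    · rw [pv_testBit_or_pow]
      simp [ih.2.2.1]
    · rw [pv_testBit_or_pow]
      simp

lemma pvReachB_inv (n : Nat) (info : List Int) (adj : PySem.Dict Int (List Int)) (hn : 1 ≤ n) :
    ∀ m, pvReach (pvSuccB n info adj) 1 m →
      m < 2 ^ n ∧ m.testBit 0 ∧ pvWolf n info m < pvSheep n info m := by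
  intro m hm
  induction hm with
  | base =>
    refine ⟨Nat.one_lt_two_pow_iff.mpr (by omega), by simp [pv_testBit_one], ?_⟩
    rw [pvSheep_one, pvWolf_one]
    omega
  | step hm hs ih =>
    obtain ⟨v, hvn, hvb, c, hcmem, hc0, hcn, hcb, rfl, hm2, hcond⟩ := hs
    refine ⟨hm2, ?_, hcond⟩
    rw [pv_testBit_or_pow]
    simp [ih.2.1]

-- a walk inside the collected set m, along A's adjacency lists
def pvStepRel (n : Nat) (g : List (List Int)) (m : Nat) (u v : Nat) : Prop :=
  u < n ∧ v < n ∧ m.testBit u ∧ m.testBit v ∧ (v : Int) ∈ g.getD u []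

lemma pvAdjTrans (n : Nat) (edges : List (List Int))
    (hpre : ∀ e ∈ edges, pvEdgeOk n e) (u : Nat) (hu : u < n) (x : Int) :
    x ∈ (pvBuildGraph n edges).getD u [] ↔ x ∈ (pvAdj edges).getD (u : Int) [] := by
  rw [pvBuildGraph_mem n edges hpre u hu x, pvAdj_mem edges (fun e he => (hpre e he).1) (u : Int) x]

lemma pvStepRel_symm (n : Nat) (edges : List (List Int))
    (hpre : ∀ e ∈ edges, pvEdgeOk n e) (m : Nat) :
    Symmetric (pvStepRel n (pvBuildGraph n edges) m) := by
  rintro u v ⟨hun, hvn, hub, hvb, hmem⟩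
  refine ⟨hvn, hun, hvb, hub, ?_⟩
  rw [pvBuildGraph_mem n edges hpre u hun (v : Int)] at hmem
  rw [pvBuildGraph_mem n edges hpre v hvn (u : Int)]
  obtain ⟨e, he, hor⟩ := hmem
  exact ⟨e, he, hor.symm⟩

lemma pvStepRel_mono (n : Nat) (g : List (List Int)) (m j : Nat) :
    ∀ u v, pvStepRel n g m u v → pvStepRel n g (m ||| 1 <<< j) u v := by
  rintro u v ⟨hun, hvn, hub, hvb, hmem⟩
  refine ⟨hun, hvn, ?_, ?_, hmem⟩
  · rw [pv_testBit_or_pow]; simp [hub]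
  · rw [pv_testBit_or_pow]; simp [hvb]

lemma pvAtoB (n : Nat) (info : List Int) (edges : List (List Int)) (hn : 1 ≤ n)
    (hpre : ∀ e ∈ edges, pvEdgeOk n e) :
    ∀ k, pvReach (pvSuccA n info (pvBuildGraph n edges)) (0, 1) k →
      pvReach (pvSuccB n info (pvAdj edges)) 1 k.2 := by
  intro k hk
  induction hk with
  | base => exact pvReach.base
  | step hk hs ih =>
    rename_i k0 k1
    obtain ⟨j, hmem, hjn, rfl, hlt, hcond⟩ := hs
    obtain ⟨hk0n, hk0lt, hk0b0, hk0bc, -⟩ := pvReachA_inv n info (pvBuildGraph n edges) hn k0 hk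
    by_cases hb : k0.2.testBit j
    · have : k0.2 ||| 1 <<< j = k0.2 := pv_or_self _ _ hb
      rw [this]
      exact ih
    · refine pvReach.step ih ⟨k0.1, hk0n, hk0bc, (j : Int), ?_, by omega, by simp [hjn], by simpa using hb, by simp, hlt, hcond⟩
      rw [← pvAdjTrans n edges hpre k0.1 hk0n (j : Int)]
      exact hmem

lemma pvConn (n : Nat) (info : List Int) (edges : List (List Int)) (hn : 1 ≤ n)
    (hpre : ∀ e ∈ edges, pvEdgeOk n e) :
    ∀ m, pvReach (pvSuccB n info (pvAdj edges)) 1 m →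
      ∀ u v, u < n → v < n → m.testBit u → m.testBit v →
        Relation.ReflTransGen (pvStepRel n (pvBuildGraph n edges) m) u v := by
  intro m hm
  induction hm with
  | base =>
    intro u v hu hv hub hvb
    rw [pv_testBit_one] at hub hvb
    simp only [decide_eq_true_eq] at hub hvb
    subst hub
    subst hvb
    exact Relation.ReflTransGen.refl
  | step hm hs ih =>
    rename_i m0 m1
    obtain ⟨v0, hv0n, hv0b, c, hcmem, hc0, hcn, hcb, rfl, hm2, hcond⟩ := hs
    set j := c.toNat with hj
    have hcmem' : (j : Int) ∈ (pvBuildGraph n edges).getD v0 [] := by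
      rw [pvAdjTrans n edges hpre v0 hv0n]
      rw [hj, Int.toNat_of_nonneg hc0]
      exact hcmem
    have hjb : (m0 ||| 1 <<< j).testBit j := by rw [pv_testBit_or_pow]; simp
    have hedge : pvStepRel n (pvBuildGraph n edges) (m0 ||| 1 <<< j) v0 j := by
      refine ⟨hv0n, hcn, ?_, hjb, hcmem'⟩
      rw [pv_testBit_or_pow]; simp [hv0b]
    have hsymm := Relation.ReflTransGen.symmetric
      (pvStepRel_symm n edges hpre (m0 ||| 1 <<< j))
    intro u v hu hv hub hvb
    rw [pv_testBit_or_pow] at hub hvb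
    have hto : ∀ w, w < n → m0.testBit w →
        Relation.ReflTransGen (pvStepRel n (pvBuildGraph n edges) (m0 ||| 1 <<< j)) w j := by
      intro w hw hwb
      exact Relation.ReflTransGen.tail
        (Relation.ReflTransGen.mono (pvStepRel_mono n (pvBuildGraph n edges) m0 j) (ih w v0 hw hv0n hwb hv0b))
        hedge
    rcases Bool.or_eq_true_iff.mp hub with hub' | hub' <;>
      rcases Bool.or_eq_true_iff.mp hvb with hvb' | hvb'
    · exact Relation.ReflTransGen.mono (pvStepRel_mono n (pvBuildGraph n edges) m0 j)
        (ih u v hu hv hub' hvb')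
    · have hv' : v = j := by simpa using (of_decide_eq_true hvb').symm
      subst hv'
      exact hto u hu hub'
    · have hu' : u = j := by simpa using (of_decide_eq_true hub').symm
      subst hu'
      exact hsymm (hto v hv hvb')
    · have hu' : u = j := by simpa using (of_decide_eq_true hub').symm
      have hv' : v = j := by simpa using (of_decide_eq_true hvb').symm
      subst hu'
      subst hv'
      exact Relation.ReflTransGen.refl

lemma pvWalkMove (n : Nat) (info : List Int) (edges : List (List Int)) (hn : 1 ≤ n)
    (hpre : ∀ e ∈ edges, pvEdgeOk n e) (m : Nat)
    (hcond : pvWolf n info m < pvSheep n info m) :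
    ∀ u v, pvReach (pvSuccA n info (pvBuildGraph n edges)) (0, 1) (u, m) →
      Relation.ReflTransGen (pvStepRel n (pvBuildGraph n edges) m) u v →
      pvReach (pvSuccA n info (pvBuildGraph n edges)) (0, 1) (v, m) := by
  intro u v hr hw
  induction hw with
  | refl => exact hr
  | tail hw hstep ih =>
    rename_i w x
    obtain ⟨hwn, hxn, hwb, hxb, hmem⟩ := hstep
    have hself : m ||| 1 <<< x = m := pv_or_self _ _ hxb
    have hmlt : m < 2 ^ n := (pvReachA_inv n info (pvBuildGraph n edges) hn (w, m) ih).2.1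
    refine pvReach.step ih ⟨x, hmem, hxn, ?_, ?_, ?_⟩
    · rw [hself]
    · rw [hself]; exact hmlt
    · rw [hself]; exact hcond

lemma pvBtoA (n : Nat) (info : List Int) (edges : List (List Int)) (hn : 1 ≤ n)
    (hpre : ∀ e ∈ edges, pvEdgeOk n e) :
    ∀ m, pvReach (pvSuccB n info (pvAdj edges)) 1 m →
      ∀ v, v < n → m.testBit v → pvReach (pvSuccA n info (pvBuildGraph n edges)) (0, 1) (v, m) := by
  intro m hm
  induction hm with
  | base =>
    intro v hv hvb
    rw [pv_testBit_one] at hvb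
    simp only [decide_eq_true_eq] at hvb
    subst hvb
    exact pvReach.base
  | step hm hs ih =>
    rename_i m0 m1
    obtain ⟨v0, hv0n, hv0b, c, hcmem, hc0, hcn, hcb, rfl, hm2, hcond⟩ := hs
    set j := c.toNat with hj
    have hcmem' : (j : Int) ∈ (pvBuildGraph n edges).getD v0 [] := by
      rw [pvAdjTrans n edges hpre v0 hv0n]
      rw [hj, Int.toNat_of_nonneg hc0]
      exact hcmem
    have hAj : pvReach (pvSuccA n info (pvBuildGraph n edges)) (0, 1) (j, m0 ||| 1 <<< j) :=
      pvReach.step (ih v0 hv0n hv0b) ⟨j, hcmem', hcn, rfl, hm2, hcond⟩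
    intro v hv hvb
    have hwalk := pvConn n info edges hn hpre (m0 ||| 1 <<< j)
      (pvReach.step hm ⟨v0, hv0n, hv0b, c, hcmem, hc0, hcn, hcb, rfl, hm2, hcond⟩)
      j v hcn hv (by rw [pv_testBit_or_pow]; simp) hvb
    exact pvWalkMove n info edges hn hpre (m0 ||| 1 <<< j) hcond j v hAj hwalk

-- ==== B-side DP lemmas ====

lemma pvSuccB_lt (n : Nat) (info : List Int) (adj : PySem.Dict Int (List Int)) (a b : Nat)
    (h : pvSuccB n info adj a b) : a < b := by
  obtain ⟨v, -, -, c, -, -, -, hcb, rfl, -, -⟩ := h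
  refine lt_of_le_of_ne (Nat.left_le_or) (fun he => ?_)
  have := pv_testBit_or_pow a c.toNat c.toNat
  rw [← he] at this
  simp [hcb] at this

lemma pv_getD_replicate (N k : Nat) : (List.replicate N false).getD k false = false := by
  unfold List.getD
  rcases lt_or_ge k N with h | h
  · rw [List.getElem?_replicate_of_lt h]
    rfl
  · rw [List.getElem?_eq_none (by simpa using h)]
    rfl

lemma pvRow_fold (info : List Int) (m : Nat) :
    ∀ (l : List Nat) (a b : Int),
      l.foldl (fun sw j =>
          if m.testBit j then (sw.1 + PySem.Int.mod (info.getD j 0 + 1) 2, sw.2 + info.getD j 0)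
          else sw) (a, b)
        = (a + ((l.filter (fun j => m.testBit j)).map (pvPar info)).sum,
           b + ((l.filter (fun j => m.testBit j)).map (pvVal info)).sum) := by
  intro l
  induction l with
  | nil => intro a b; simp
  | cons x xs ih =>
    intro a b
    rw [List.foldl_cons]
    by_cases hx : m.testBit x
    · simp only [hx, if_true, List.filter_cons_of_pos (by simpa using hx), List.map_cons,
        List.sum_cons]
      rw [ih]
      refine Prod.ext ?_ ?_ <;> simp [pvPar, pvVal] <;> ring
    · simp only [hx, Bool.false_eq_true, if_false,
        List.filter_cons_of_neg (by simpa using hx)]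
      exact ih a b

lemma pvRow_sum (info : List Int) (n m : Nat) (f : Nat → Int) :
    (((List.range' 1 (n - 1)).filter (fun j => m.testBit j)).map f).sum
      = ∑ j ∈ pvMaskSet n m, f j := by
  have hnd : ((List.range' 1 (n - 1)).filter (fun j => m.testBit j)).Nodup :=
    (List.nodup_range').filter _
  have hfin : ((List.range' 1 (n - 1)).filter (fun j => m.testBit j)).toFinset
      = pvMaskSet n m := by
    ext j
    simp only [List.mem_toFinset, List.mem_filter, List.mem_range'_1, pvMaskSet,
      Finset.mem_filter, Finset.mem_range, decide_eq_true_eq]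
    constructor
    · rintro ⟨⟨h1, h2⟩, hb⟩
      exact ⟨by omega, hb, by omega⟩
    · rintro ⟨h1, hb, h2⟩
      exact ⟨⟨by omega, by omega⟩, hb⟩
  rw [← hfin, List.sum_toFinset f hnd]

lemma pvRowB_eq (info : List Int) (n m : Nat) :
    pvRowB info n m = (pvSheep n info m, pvWolf n info m) := by
  unfold pvRowB pvSheep pvWolf
  rw [pvRow_fold, pvRow_sum info n m (pvPar info), pvRow_sum info n m (pvVal info)]
  simp

-- what the inner `for c in l` loop of B may mark
def pvPushC (n : Nat) (info : List Int) (l : List Int) (m k : Nat) : Prop :=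
  ∃ c : Int, c ∈ l ∧ 0 ≤ c ∧ c.toNat < n ∧ ¬ m.testBit c.toNat ∧
    k = m ||| 1 <<< c.toNat ∧ pvWolf n info k < pvSheep n info k

lemma pvPushC_cons (n : Nat) (info : List Int) (x : Int) (xs : List Int) (m k : Nat) :
    pvPushC n info (x :: xs) m k ↔ pvPushC n info [x] m k ∨ pvPushC n info xs m k := by
  simp only [pvPushC, List.mem_cons, List.not_mem_nil, or_false]
  constructor
  · rintro ⟨c, hcx | hcs, hp⟩
    · exact Or.inl ⟨c, hcx, hp⟩
    · exact Or.inr ⟨c, hcs, hp⟩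
  · rintro (⟨c, hcx, hp⟩ | ⟨c, hcs, hp⟩)
    · exact ⟨c, Or.inl hcx, hp⟩
    · exact ⟨c, Or.inr hcs, hp⟩

lemma pvSetStep_spec (n : Nat) (info : List Int) (m : Nat) (sheep wolf : Int)
    (hm : m < 2 ^ n) (h0 : m.testBit 0)
    (hsh : sheep = pvSheep n info m) (hw : wolf = pvWolf n info m)
    (r : List Bool) (hr : r.length = 2 ^ n) (x : Int) :
    (pvSetStep n info m sheep wolf r x).length = 2 ^ n ∧
      ∀ k, ((pvSetStep n info m sheep wolf r x).getD k false = true ↔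
        r.getD k false = true ∨ pvPushC n info [x] m k) := by
  unfold pvSetStep
  by_cases hg : 0 ≤ x ∧ x.toNat < n
  · rw [if_pos hg]
    by_cases hb : m.testBit x.toNat
    · rw [if_pos hb]
      refine ⟨hr, fun k => ?_⟩
      have : ¬ pvPushC n info [x] m k := by
        rintro ⟨c, hc, -, -, hcb, -⟩
        rw [List.mem_singleton] at hc
        subst hc
        exact hcb hb
      tauto
    · rw [if_neg hb]
      dsimp only
      have hlt2 : 1 <<< x.toNat < 2 ^ n := by
        rw [Nat.one_shiftLeft]
        exact Nat.pow_lt_pow_right (by norm_num) hg.2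
      have hns2 : m ||| 1 <<< x.toNat < 2 ^ n := Nat.or_lt_two_pow hm hlt2
      have e1 : sheep + PySem.Int.mod (info.getD x.toNat 0 + 1) 2
          = pvSheep n info (m ||| 1 <<< x.toNat) := by
        rw [hsh, pvSheep_or n info m x.toNat hg.2 hb h0]; rfl
      have e2 : wolf + info.getD x.toNat 0 = pvWolf n info (m ||| 1 <<< x.toNat) := by
        rw [hw, pvWolf_or n info m x.toNat hg.2 hb h0]; rfl
      rw [e1, e2]
      have huniq : ∀ k, pvPushC n info [x] m k → k = m ||| 1 <<< x.toNat := by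
        rintro k ⟨c, hc, -, -, -, hk, -⟩
        rw [List.mem_singleton] at hc
        subst hc
        exact hk
      by_cases hcond : pvWolf n info (m ||| 1 <<< x.toNat) < pvSheep n info (m ||| 1 <<< x.toNat)
      · rw [if_pos hcond]
        refine ⟨by rw [List.length_set, hr], fun k => ?_⟩
        rw [pv_getD_set r (m ||| 1 <<< x.toNat) true k false (by omega)]
        by_cases hk : k = m ||| 1 <<< x.toNat
        · subst hk
          simp only [if_pos rfl]
          constructor
          · intro _
            exact Or.inr ⟨x, List.mem_singleton.mpr rfl, hg.1, hg.2, hb, rfl, hcond⟩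
          · intro _; rfl
        · rw [if_neg hk]
          constructor
          · exact Or.inl
          · rintro (h | h)
            · exact h
            · exact absurd (huniq k h) hk
      · rw [if_neg hcond]
        refine ⟨hr, fun k => ?_⟩
        have : ¬ pvPushC n info [x] m k := by
          intro h
          obtain ⟨c, hc, h1, h2, h3, hk, hlt⟩ := h
          rw [List.mem_singleton] at hc
          subst hc
          rw [hk] at hlt
          exact hcond hlt
        tauto
  · rw [if_neg hg]
    refine ⟨hr, fun k => ?_⟩
    have : ¬ pvPushC n info [x] m k := by
      rintro ⟨c, hc, h1, h2, -⟩
      rw [List.mem_singleton] at hc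
      subst hc
      exact hg ⟨h1, h2⟩
    tauto

lemma pvInnerB (n : Nat) (info : List Int) (m : Nat) (sheep wolf : Int)
    (hm : m < 2 ^ n) (h0 : m.testBit 0)
    (hsh : sheep = pvSheep n info m) (hw : wolf = pvWolf n info m) :
    ∀ (l : List Int) (r : List Bool), r.length = 2 ^ n →
      (l.foldl (pvSetStep n info m sheep wolf) r).length = 2 ^ n ∧
      ∀ k, ((l.foldl (pvSetStep n info m sheep wolf) r).getD k false = true ↔
        r.getD k false = true ∨ pvPushC n info l m k) := by
  intro l
  induction l with
  | nil =>
    intro r hr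
    refine ⟨hr, fun k => ?_⟩
    simp [pvPushC]
  | cons x xs ih =>
    intro r hr
    rw [List.foldl_cons]
    obtain ⟨hlen1, hmem1⟩ := pvSetStep_spec n info m sheep wolf hm h0 hsh hw r hr x
    obtain ⟨hlen2, hmem2⟩ := ih (pvSetStep n info m sheep wolf r x) hlen1
    refine ⟨hlen2, fun k => ?_⟩
    rw [hmem2 k, hmem1 k, pvPushC_cons n info x xs m k]
    tauto

-- what one processed mask m of B may mark, over the prefix vl of range n
def pvPushV (n : Nat) (info : List Int) (adj : PySem.Dict Int (List Int))
    (vl : List Nat) (m k : Nat) : Prop :=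
  ∃ v ∈ vl, m.testBit v ∧ pvPushC n info (adj.getD (v : Int) []) m k

lemma pvExpandB_aux (n : Nat) (info : List Int) (adj : PySem.Dict Int (List Int))
    (m : Nat) (sheep wolf : Int)
    (hm : m < 2 ^ n) (h0 : m.testBit 0)
    (hsh : sheep = pvSheep n info m) (hw : wolf = pvWolf n info m) :
    ∀ (vl : List Nat) (r : List Bool), r.length = 2 ^ n →
      ((vl.foldl (fun r v =>
          if m.testBit v then (adj.getD (v : Int) []).foldl (pvSetStep n info m sheep wolf) r
          else r) r).length = 2 ^ n ∧
      ∀ k, ((vl.foldl (fun r v =>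
          if m.testBit v then (adj.getD (v : Int) []).foldl (pvSetStep n info m sheep wolf) r
          else r) r).getD k false = true ↔
        r.getD k false = true ∨ pvPushV n info adj vl m k)) := by
  intro vl
  induction vl with
  | nil =>
    intro r hr
    refine ⟨hr, fun k => ?_⟩
    simp [pvPushV]
  | cons v vs ih =>
    intro r hr
    rw [List.foldl_cons]
    have hsplit : ∀ k, pvPushV n info adj (v :: vs) m k ↔
        (m.testBit v ∧ pvPushC n info (adj.getD (v : Int) []) m k) ∨ pvPushV n info adj vs m k := by
      intro k
      simp only [pvPushV, List.mem_cons]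
      constructor
      · rintro ⟨u, (rfl | hu), hb, hp⟩
        · exact Or.inl ⟨hb, hp⟩
        · exact Or.inr ⟨u, hu, hb, hp⟩
      · rintro (⟨hb, hp⟩ | ⟨u, hu, hb, hp⟩)
        · exact ⟨v, Or.inl rfl, hb, hp⟩
        · exact ⟨u, Or.inr hu, hb, hp⟩
    by_cases hb : m.testBit v
    · rw [if_pos hb]
      obtain ⟨hlen1, hmem1⟩ :=
        pvInnerB n info m sheep wolf hm h0 hsh hw (adj.getD (v : Int) []) r hr
      obtain ⟨hlen2, hmem2⟩ := ih _ hlen1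
      refine ⟨hlen2, fun k => ?_⟩
      rw [hmem2 k, hmem1 k, hsplit k]
      tauto
    · rw [if_neg hb]
      obtain ⟨hlen2, hmem2⟩ := ih r hr
      refine ⟨hlen2, fun k => ?_⟩
      rw [hmem2 k, hsplit k]
      tauto

lemma pvExpandB_spec (n : Nat) (info : List Int) (adj : PySem.Dict Int (List Int))
    (m : Nat) (sheep wolf : Int)
    (hm : m < 2 ^ n) (h0 : m.testBit 0)
    (hsh : sheep = pvSheep n info m) (hw : wolf = pvWolf n info m)
    (reach : List Bool) (hr : reach.length = 2 ^ n) :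
    (pvExpandB n info adj m sheep wolf reach).length = 2 ^ n ∧
      ∀ k, ((pvExpandB n info adj m sheep wolf reach).getD k false = true ↔
        reach.getD k false = true ∨ pvSuccB n info adj m k) := by
  obtain ⟨hlen, hmem⟩ :=
    pvExpandB_aux n info adj m sheep wolf hm h0 hsh hw (List.range n) reach hr
  refine ⟨hlen, fun k => ?_⟩
  rw [show pvExpandB n info adj m sheep wolf reach = ((List.range n).foldl (fun r v =>
      if m.testBit v then (adj.getD (v : Int) []).foldl (pvSetStep n info m sheep wolf) r
      else r) reach) from rfl, hmem k]
  have : pvPushV n info adj (List.range n) m k ↔ pvSuccB n info adj m k := by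
    constructor
    · rintro ⟨v, hv, hbv, c, hc, h1, h2, h3, h4, h5⟩
      rw [List.mem_range] at hv
      have hk2 : k < 2 ^ n := by
        subst h4
        exact Nat.or_lt_two_pow hm (by
          rw [Nat.one_shiftLeft]
          exact Nat.pow_lt_pow_right (by norm_num) h2)
      exact ⟨v, hv, hbv, c, hc, h1, h2, h3, h4, hk2, h5⟩
    · rintro ⟨v, hv, hbv, c, hc, h1, h2, h3, h4, -, h5⟩
      exact ⟨v, List.mem_range.mpr hv, hbv, c, hc, h1, h2, h3, h4, h5⟩
  rw [this]

lemma pvLoopB (n : Nat) (info : List Int) (adj : PySem.Dict Int (List Int)) (hn : 1 ≤ n)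
    (S : Finset Nat) (hS : ∀ k, k ∈ S ↔ pvReach (pvSuccB n info adj) 1 k) :
    ∀ (len i : Nat) (reach : List Bool) (best : Int), 1 ≤ i →
      reach.length = 2 ^ n →
      (∀ k, reach.getD k false = true ↔
        (k = 1 ∨ ∃ m', m' < i ∧ m' ∈ S ∧ pvSuccB n info adj m' k)) →
      best = (S.filter (· < i)).fold max 0 (pvSheep n info) →
      ((List.range' i len).foldl (pvDPStep n info adj) (reach, best)).2
        = (S.filter (· < i + len)).fold max 0 (pvSheep n info) := by
  intro len
  induction len with
  | zero =>
    intro i reach best hi hlen hinv hbest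
    simpa using hbest
  | succ len ih =>
    intro i reach best hi hlen hinv hbest
    rw [List.range'_succ, List.foldl_cons]
    have hiS : reach.getD i false = true ↔ i ∈ S := by
      rw [hinv i, hS i]
      constructor
      · rintro (rfl | ⟨m', hm', hmS, hsucc⟩)
        · exact pvReach.base
        · exact pvReach.step ((hS m').mp hmS) hsucc
      · intro hri
        cases hri with
        | base => exact Or.inl rfl
        | step h hsucc =>
          rename_i m'
          have hlt := pvSuccB_lt n info adj m' i hsucc
          exact Or.inr ⟨m', hlt, (hS m').mpr h, hsucc⟩
    have hstep : i + (len + 1) = (i + 1) + len := by omega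
    rw [hstep]
    by_cases hri : reach.getD i false = true
    · have hiS' : i ∈ S := hiS.mp hri
      have hRi := (hS i).mp hiS'
      obtain ⟨hi2, hib0, -⟩ := pvReachB_inv n info adj hn i hRi
      have hdp : pvDPStep n info adj (reach, best) i
          = (pvExpandB n info adj i (pvSheep n info i) (pvWolf n info i) reach,
             if best < pvSheep n info i then pvSheep n info i else best) := by
        unfold pvDPStep
        rw [if_pos hri]
        rw [pvRowB_eq]
      rw [hdp]
      obtain ⟨hlen', hmem'⟩ :=
        pvExpandB_spec n info adj i (pvSheep n info i) (pvWolf n info i) hi2 hib0 rfl rfl reach hlen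
      refine ih (i + 1) _ _ (by omega) hlen' ?_ ?_
      · intro k
        rw [hmem' k, hinv k]
        constructor
        · rintro ((rfl | ⟨m', hm', hmS, hsucc⟩) | hsi)
          · exact Or.inl rfl
          · exact Or.inr ⟨m', by omega, hmS, hsucc⟩
          · exact Or.inr ⟨i, by omega, hiS', hsi⟩
        · rintro (rfl | ⟨m', hm', hmS, hsucc⟩)
          · exact Or.inl (Or.inl rfl)
          · by_cases hmi : m' = i
            · subst hmi
              exact Or.inr hsucc
            · exact Or.inl (Or.inr ⟨m', by omega, hmS, hsucc⟩)
      · have hfilter : S.filter (· < i + 1) = insert i (S.filter (· < i)) := by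
          ext k
          simp only [Finset.mem_filter, Finset.mem_insert]
          constructor
          · rintro ⟨hk, hki⟩
            by_cases hke : k = i
            · exact Or.inl hke
            · exact Or.inr ⟨hk, by omega⟩
          · rintro (rfl | ⟨hk, hki⟩)
            · exact ⟨hiS', by omega⟩
            · exact ⟨hk, by omega⟩
        have hnotmem : i ∉ S.filter (· < i) := by
          simp [Finset.mem_filter]
        rw [hfilter, Finset.fold_insert hnotmem, hbest, max_def]
        split_ifs <;> omega
    · have hiS' : i ∉ S := fun h => hri (hiS.mpr h)
      have hdp : pvDPStep n info adj (reach, best) i = (reach, best) := by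
        unfold pvDPStep
        rw [if_neg hri]
      rw [hdp]
      refine ih (i + 1) _ _ (by omega) hlen ?_ ?_
      · intro k
        rw [hinv k]
        constructor
        · rintro (rfl | ⟨m', hm', hmS, hsucc⟩)
          · exact Or.inl rfl
          · exact Or.inr ⟨m', by omega, hmS, hsucc⟩
        · rintro (rfl | ⟨m', hm', hmS, hsucc⟩)
          · exact Or.inl rfl
          · by_cases hmi : m' = i
            · subst hmi
              exact absurd hmS hiS'
            · exact Or.inr ⟨m', by omega, hmS, hsucc⟩
      · have hfilter : S.filter (· < i + 1) = S.filter (· < i) := by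
          ext k
          simp only [Finset.mem_filter]
          constructor
          · rintro ⟨hk, hki⟩
            refine ⟨hk, ?_⟩
            by_cases hke : k = i
            · subst hke; exact absurd hk hiS'
            · omega
          · rintro ⟨hk, hki⟩
            exact ⟨hk, by omega⟩
        rw [hfilter]
        exact hbest

lemma pvAltResult (info : List Int) (edges : List (List Int)) (hn : 1 ≤ info.length)
    (S : Finset Nat)
    (hS : ∀ k, k ∈ S ↔ pvReach (pvSuccB info.length info (pvAdj edges)) 1 k) :
    solution_alt info edges = S.fold max 0 (pvSheep info.length info) := by
  set n := info.length with hnn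
  have h2n : 2 ≤ 2 ^ n := by
    calc 2 = 2 ^ 1 := by norm_num
    _ ≤ 2 ^ n := Nat.pow_le_pow_right (by norm_num) hn
  have hS0 : (0 : Nat) ∉ S := by
    intro h
    have := (pvReachB_inv n info (pvAdj edges) hn 0 ((hS 0).mp h)).2.1
    simp [Nat.testBit] at this
  show ((List.range' 1 (2 ^ n - 1)).foldl (pvDPStep n info (pvAdj edges))
      ((List.replicate (2 ^ n) false).set 1 true, 0)).2 = _
  have hloop := pvLoopB n info (pvAdj edges) hn S hS (2 ^ n - 1) 1
    ((List.replicate (2 ^ n) false).set 1 true) 0 (by omega)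
    (by rw [List.length_set, List.length_replicate])
    ?_ ?_
  · rw [hloop]
    congr 1
    ext k
    simp only [Finset.mem_filter]
    constructor
    · rintro ⟨hk, -⟩; exact hk
    · intro hk
      refine ⟨hk, ?_⟩
      have := (pvReachB_inv n info (pvAdj edges) hn k ((hS k).mp hk)).1
      omega
  · intro k
    rw [pv_getD_set (List.replicate (2 ^ n) false) 1 true k false
      (by rw [List.length_replicate]; omega)]
    constructor
    · intro h
      by_cases hk : k = 1
      · exact Or.inl hk
      · rw [if_neg hk, pv_getD_replicate] at h
        exact absurd h (by simp)
    · rintro (rfl | ⟨m', hm', hmS, -⟩)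
      · rw [if_pos rfl]
      · interval_cases m'
        exact absurd hmS hS0
  · have : S.filter (· < 1) = ∅ := by
      apply Finset.eq_empty_of_forall_notMem
      intro k hk
      simp only [Finset.mem_filter] at hk
      obtain ⟨hkS, hk1⟩ := hk
      interval_cases k
      exact hS0 hkS
    rw [this, Finset.fold_empty]

-- ===== VERDICT (by name: the statement is the Claim_ definition above) =====
theorem solution_spec : Claim_equal_solution := by
  intro info edges hdom hpre
  unfold Spec_solution
  obtain ⟨hne, hedges⟩ := hpre
  set n := info.length with hnn
  have hn : 1 ≤ n := List.length_pos_iff.mpr hne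
  have hpre' : ∀ e ∈ edges, pvEdgeOk n e := hedges
  set g := pvBuildGraph n edges with hg
  set adj := pvAdj edges with hadj
  -- A side: characterise the BFS result as a fold over the visited key set FA
  have hGood0 : pvGoodA n info (1, 0, 1, 0) := by
    refine ⟨hn, Nat.one_lt_two_pow_iff.mpr (by omega), by simp [pv_testBit_one],
      by simp [pv_testBit_one], ?_, ?_⟩
    · exact (pvSheep_one n info).symm
    · exact (pvWolf_one n info).symm
  have hq0 : ∀ s ∈ [((1 : Nat), (0 : Nat), (1 : Int), (0 : Int))],
      pvGoodA n info s ∧ pvKeyA s ∈ ({((0 : Nat), (1 : Nat))} : Finset (Nat × Nat)) := by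
    intro s hs
    rw [List.mem_singleton] at hs
    subst hs
    exact ⟨hGood0, by simp [pvKeyA]⟩
  have hnd0 : (([((1 : Nat), (0 : Nat), (1 : Int), (0 : Int))]).map pvKeyA).Nodup := by simp
  have hresA := pvBfs_result n info g [(1, 0, 1, 0)] {(0, 1)} 0 hq0 hnd0
  set FA := pvBfsVis n info g [(1, 0, 1, 0)] {(0, 1)} with hFAdef
  have hFA : ∀ k, k ∈ FA ↔ pvReach (pvSuccA n info g) (0, 1) k := by
    intro k
    constructor
    · refine pvBfsVis_sound n info g _ _ hq0 ?_ k
      intro k' hk'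
      rw [Finset.mem_singleton] at hk'
      subst hk'
      exact pvReach.base
    · intro hk
      refine pvReach_subset (pvSuccA n info g) (0, 1) (fun k => k ∈ FA) ?_ ?_ k hk
      · exact pvBfsVis_mono n info g _ _ (by simp)
      · intro a ha b hb
        refine pvBfsVis_closed n info g _ _ hq0 ?_ a ha b hb
        intro k' hk' hnk'
        rw [Finset.mem_singleton] at hk'
        subst hk'
        exact absurd (by simp [pvKeyA]) hnk'
  -- the masks of FA are exactly the masks B's DP reaches
  have hS : ∀ m, m ∈ FA.image Prod.snd ↔ pvReach (pvSuccB n info adj) 1 m := by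
    intro m
    rw [Finset.mem_image]
    constructor
    · rintro ⟨k, hk, rfl⟩
      exact pvAtoB n info edges hn hpre' k ((hFA k).mp hk)
    · intro hm
      have h0 : m.testBit 0 := (pvReachB_inv n info adj hn m hm).2.1
      exact ⟨(0, m), (hFA (0, m)).mpr (pvBtoA n info edges hn hpre' m hm 0 hn h0), rfl⟩
  -- assemble
  show pvBfs n info g [(1, 0, 1, 0)] {(0, 1)} 0 = solution_alt info edges
  rw [hresA, pvAltResult info edges hn (FA.image Prod.snd) hS]
  have hda : ({((0 : Nat), (1 : Nat))} : Finset (Nat × Nat))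
      \ (([((1 : Nat), (0 : Nat), (1 : Int), (0 : Int))]).map pvKeyA).toFinset = ∅ := by
    simp [pvKeyA]
  rw [hda, Finset.sdiff_empty, Finset.fold_image_idem]
  rfl
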